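-- pv_equiv track=rewrite | github.com/safehammad/mancify | mancify/pronunciation.py | match_consonant
-- ===== SOURCE A (Python) =====
-- phoneme_sounds = {
--     "B":    ['b'],                  # 'b' as in 'bee'
--     "CH":   ['ch',                  # 'ch' as in 'cheese'
--              'tch'],                # 'tch' as in 'snatch'
--     "D":    ['d'],                  # 'd' as in 'dog'
--     "DH":   ['th'],                 # 'th' as in 'thee'
--     "F":    ['f',                   # 'f' as in 'fee'
--              'ph',                  # 'ph' as in 'phone'
--              'gh'],                 # 'gh' as in 'rough'
--     "G":    ['g'],                  # 'g' as in 'green'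
--     "HH":   ['h'],                  # 'h' as in 'house'
--     "JH":   ['dg',                  # 'dg' as in 'bridge'
--              'g',                   # 'g' as in 'gee'
--              'j'],                  # 'j' as in 'jail'
--     "K":    ['c',                   # 'c' as in 'car'
--              'ck',                  # 'ck' as in 'attack'
--              'cq',                  # 'cq' as in 'acquire'
--              'k',                   # 'k' as in 'key'
--              'q',                   # 'q' as in 'queen'
--              'x'],                  # 'x' as in 'fox'
--     "L":    ['l'],                  # 'l' as in 'lee'
--     "M":    ['m'],                  # 'm' as in 'me'
--     "N":    ['n'],                  # 'kn' as in 'knee'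
--     "NG":   ['ng'],                 # 'ng' as in 'ping'
--     "P":    ['p'],                  # 'p' as in 'pee'
--     "R":    ['r'],                  # 'r' as in 'read'
--     "S":    ['c',                   # 'c' as in 'care'
--              's'],                  # 's' as in 'sea'
--     "SH":   ['ch',                  # 'ch' as in 'attache'
--              'sh',                  # 'sh' as in 'she'
--              't',                   # 't' as in 'nation'
--              'ss'],                 # 'ss' as in 'session'
--     "T":    ['t'],                  # 't' as in 'tea'
--     "TH":   ['th'],                 # 'th' as in 'theta'
--     "V":    ['v'],                  # 'v' as in 'vent'
--     "W":    ['u',                   # 'u' as in 'queen'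
--              'w'],                  # 'w' as in 'we'
--     "Y":    ['i',                   # 'i' as in 'spaniel'
--              'y'],                  # 'y' as in 'yield'
--     "Z":    ['s',                   # 's' as in 'cars'
--              'z'],                  # 'z' as in 'zebra'
--     "ZH":   ['g',                   # 'g' as in 'mirage'
--              'j',                   # 'j' as in 'jacque'
--              's',                   # 's' as in occasion
--              'z'],                  # 'z' as in 'seizure'
--     "'":    ["'"],                  # glottal stop
-- }
--
-- def partition_score(partition):
--     """For a 3-tuple of strings (a, b, c) provide a lower score for a smaller a and larger b."""
--     prefix, consonant, suffix = partition
--     return len(prefix), -len(consonant)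
--
-- def match_consonant(text, consonant_phoneme, next_phoneme=None):
--     """Find the best matching consonant given a consonant phoneme.
--
--     Return partitioned text as a 3-tuple i.e. (prefix, consonant, suffix). Note that the
--     'consonant' might be a diphthong or doubled letter, for example, "th", "ng", "tch", "tt".
--
--     The best match will generally be the first possible consonant with the greediest
--     number of letters. For example, looking for sound 'T' in 'attach', the first match
--     is the first 't', but the greediest acceptable match is 'tt' representing that sound.
--
--     >>> match_consonant('attach', 'T')
--     (u'a', u'tt', u'ach')
--
--     The next_phoneme is optionally given as a look ahead to confirm greediness. For example,
--     looking for 'K' in 'accept' where 'S' is the next phoneme, will only return the first 'c'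
--     because the second 'c' qualifies for representing the following 'S' phoneme:
--
--     >>> match_consonant('accept', 'K', 'S')
--     (u'a', u'c', u'cept')
--
--     """
--     partitions = [text.partition(consonant)
--                   for consonant in phoneme_sounds[consonant_phoneme]
--                   if consonant in text]
--
--     if not partitions:
--         return '', '', text
--
--     prefix, consonant, suffix = min(partitions, key=partition_score)
--     # Check for doubled consonants e.g. 's' in assert.
--     # Avoid doubling when second consonant represents a new sound e.g. 'c' in success.
--     if suffix.startswith(consonant) and suffix[0] not in phoneme_sounds.get(next_phoneme, []):
--         return prefix, consonant + consonant, suffix[1:]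
--     else:
--         return prefix, consonant, suffix
-- ===== SOURCE B (Python) =====
-- # B: single left-to-right scan — at the first index where any spelling matches,
-- # take the longest matching spelling; replaces A's build-all-partitions + min-by-key.
-- phoneme_sounds = {
--     "B":    ['b'],
--     "CH":   ['ch', 'tch'],
--     "D":    ['d'],
--     "DH":   ['th'],
--     "F":    ['f', 'ph', 'gh'],
--     "G":    ['g'],
--     "HH":   ['h'],
--     "JH":   ['dg', 'g', 'j'],
--     "K":    ['c', 'ck', 'cq', 'k', 'q', 'x'],
--     "L":    ['l'],
--     "M":    ['m'],
--     "N":    ['n'],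
--     "NG":   ['ng'],
--     "P":    ['p'],
--     "R":    ['r'],
--     "S":    ['c', 's'],
--     "SH":   ['ch', 'sh', 't', 'ss'],
--     "T":    ['t'],
--     "TH":   ['th'],
--     "V":    ['v'],
--     "W":    ['u', 'w'],
--     "Y":    ['i', 'y'],
--     "Z":    ['s', 'z'],
--     "ZH":   ['g', 'j', 's', 'z'],
--     "'":    ["'"],
-- }
--
--
-- def _find_first(text, candidates):
--     """Scan text left to right; at the first index where some candidate spelling
--     starts, return (prefix, longest-such-candidate, suffix); None if no match."""
--     for i in range(len(text)):
--         matches = [c for c in candidates if text.startswith(c, i)]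
--         if matches:
--             c = max(matches, key=len)
--             return text[:i], c, text[i + len(c):]
--     return None
--
--
-- def match_consonant(text, consonant_phoneme, next_phoneme=None):
--     found = _find_first(text, phoneme_sounds[consonant_phoneme])
--     if found is None:
--         return '', '', text
--     prefix, consonant, suffix = found
--     if suffix.startswith(consonant) and suffix[0] not in phoneme_sounds.get(next_phoneme, []):
--         return prefix, consonant + consonant, suffix[1:]
--     return prefix, consonant, suffix
-- ===== Notes on version B (the rewrite author's own statement) =====
-- stated objective: alternative
-- what changed: A builds text.partition(c) for every candidate spelling present in the text and takes the min by the key (len(prefix), -len(consonant)); B instead scans the text left to right once and, at the first index where any candidate spelling matches, picks the longest spelling matching there, then applies the same doubling check.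
import Mathlib
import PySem

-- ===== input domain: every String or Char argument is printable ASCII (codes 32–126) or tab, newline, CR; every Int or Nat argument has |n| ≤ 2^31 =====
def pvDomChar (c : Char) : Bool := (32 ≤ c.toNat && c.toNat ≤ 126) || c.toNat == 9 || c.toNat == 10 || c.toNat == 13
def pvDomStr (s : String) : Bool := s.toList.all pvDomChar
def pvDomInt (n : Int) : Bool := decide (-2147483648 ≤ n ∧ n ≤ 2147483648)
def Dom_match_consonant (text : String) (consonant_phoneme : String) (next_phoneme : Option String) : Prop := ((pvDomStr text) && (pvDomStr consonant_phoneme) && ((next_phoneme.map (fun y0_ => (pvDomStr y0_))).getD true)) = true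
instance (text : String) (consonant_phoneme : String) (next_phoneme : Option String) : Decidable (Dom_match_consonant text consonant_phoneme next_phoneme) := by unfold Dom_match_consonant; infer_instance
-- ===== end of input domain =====

-- B replaces A's build-all-partitions-and-take-min-by-(prefix,-len) with a single
-- left-to-right scan that stops at the first index where a spelling matches and takes
-- the longest spelling there (objective: alternative algorithm, same result).

-- ===== PORT A =====

-- the module-level phoneme_sounds dict
def phonemeSounds : PySem.Dict String (List String) := PySem.Dict.ofList [
  ("B", ["b"]), ("CH", ["ch", "tch"]), ("D", ["d"]), ("DH", ["th"]),
  ("F", ["f", "ph", "gh"]), ("G", ["g"]), ("HH", ["h"]), ("JH", ["dg", "g", "j"]),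
  ("K", ["c", "ck", "cq", "k", "q", "x"]), ("L", ["l"]), ("M", ["m"]), ("N", ["n"]),
  ("NG", ["ng"]), ("P", ["p"]), ("R", ["r"]), ("S", ["c", "s"]),
  ("SH", ["ch", "sh", "t", "ss"]), ("T", ["t"]), ("TH", ["th"]), ("V", ["v"]),
  ("W", ["u", "w"]), ("Y", ["i", "y"]), ("Z", ["s", "z"]), ("ZH", ["g", "j", "s", "z"]),
  ("'", ["'"])]

-- str.partition(sep) on char lists (exact for the reachable case sep in s;
-- when sep is absent Python returns (s, '', '') — same here via find = -1)
def pyPartition (s sep : List Char) : List Char × List Char × List Char :=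
  let i := PySem.Chars.find s sep
  if i = -1 then (s, [], [])
  else (s.take i.toNat, sep, s.drop (i.toNat + sep.length))

-- A: partitions for every candidate occurring in text, then min by (len(prefix), -len(consonant))
def match_consonant (text : String) (consonant_phoneme : String) (next_phoneme : Option String) : String × String × String :=
  let sounds := (phonemeSounds.get? consonant_phoneme).getD []
  let partitions := (sounds.filter (fun c => PySem.Str.isIn c text)).map
      (fun c => pyPartition text.toList c.toList)
  match PySem.List.min2? partitions (fun p => (p.1.length : Int)) (fun p => -(p.2.1.length : Int)) with
  | none => ("", "", text)   -- `if not partitions`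
  | some (pre, cons, suf) =>
    let nextSounds := (match next_phoneme with
      | none => []
      | some p => (phonemeSounds.get? p).getD [])
    if PySem.Chars.startswith suf cons ∧ String.ofList [PySem.List.pyGetD suf 0 ' '] ∉ nextSounds then
      (String.ofList pre, String.ofList (cons ++ cons), String.ofList (suf.drop 1))
    else
      (String.ofList pre, String.ofList cons, String.ofList suf)

-- ===== PORT B =====

-- _find_first: scan text index by index; at the first index where some candidate
-- matches, return (prefix, longest matching candidate, suffix)
def findFirst (cands : List (List Char)) (pre rest : List Char) : Option (List Char × List Char × List Char) :=
  match rest with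
  | [] => none
  | ch :: t =>
    match PySem.List.max? (cands.filter (fun c => PySem.Chars.startswith rest c)) (fun c => (c.length : Int)) with
    | some c => some (pre, c, rest.drop c.length)
    | none => findFirst cands (pre ++ [ch]) t

def match_consonant_alt (text : String) (consonant_phoneme : String) (next_phoneme : Option String) : String × String × String :=
  let cands := ((phonemeSounds.get? consonant_phoneme).getD []).map String.toList
  match findFirst cands [] text.toList with
  | none => ("", "", text)
  | some (pre, cons, suf) =>
    let nextSounds := (match next_phoneme with
      | none => []
      | some p => (phonemeSounds.get? p).getD [])
    if PySem.Chars.startswith suf cons ∧ String.ofList [PySem.List.pyGetD suf 0 ' '] ∉ nextSounds then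
      (String.ofList pre, String.ofList (cons ++ cons), String.ofList (suf.drop 1))
    else
      (String.ofList pre, String.ofList cons, String.ofList suf)

-- ===== PRECONDITION & SPEC =====

-- A raises KeyError when consonant_phoneme is not a key of phoneme_sounds; Pre_ admits exactly the keys.
def Pre_match_consonant (text : String) (consonant_phoneme : String) (next_phoneme : Option String) : Prop :=
  consonant_phoneme ∈ (["B", "CH", "D", "DH", "F", "G", "HH", "JH", "K", "L", "M", "N",
    "NG", "P", "R", "S", "SH", "T", "TH", "V", "W", "Y", "Z", "ZH", "'"] : List String)
instance (text : String) (consonant_phoneme : String) (next_phoneme : Option String) : Decidable (Pre_match_consonant text consonant_phoneme next_phoneme) := by unfold Pre_match_consonant; infer_instance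

def pvWitness_match_consonant : String × String × Option String := ("attach", "T", none)

def Spec_match_consonant (text : String) (consonant_phoneme : String) (next_phoneme : Option String) (out : String × String × String) : Prop := out = match_consonant_alt text consonant_phoneme next_phoneme
instance (text : String) (consonant_phoneme : String) (next_phoneme : Option String) (out : String × String × String) : Decidable (Spec_match_consonant text consonant_phoneme next_phoneme out) := by unfold Spec_match_consonant; infer_instance

-- ===== CLAIM (what is proved, stated in full; the proofs are below) =====
def Claim_equal_match_consonant : Prop := ∀ (text : String) (consonant_phoneme : String) (next_phoneme : Option String), Dom_match_consonant text consonant_phoneme next_phoneme → Pre_match_consonant text consonant_phoneme next_phoneme → Spec_match_consonant text consonant_phoneme next_phoneme (match_consonant text consonant_phoneme next_phoneme)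

-- ===== LEMMAS AND PROOFS =====

-- named step of A's min-by-(len prefix, -len consonant) fold
def mstep (acc : Option (List Char × List Char × List Char)) (x : List Char × List Char × List Char) : Option (List Char × List Char × List Char) :=
  match acc with
  | none => some x
  | some m => if (decide ((x.1.length : Int) < (m.1.length : Int)) ||
      (!decide ((m.1.length : Int) < (x.1.length : Int)) &&
       decide (-((x.2.1.length : Nat) : Int) < -((m.2.1.length : Nat) : Int)))) = true
      then some x else some m

-- named step of B's max-by-length fold
def xstep (acc : Option (List Char)) (c : List Char) : Option (List Char) :=
  match acc with
  | none => some c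
  | some m => if ((m.length : Int) < (c.length : Int)) then some c else some m

lemma min2?_eq_foldl (xs : List (List Char × List Char × List Char)) :
    PySem.List.min2? xs (fun p => (p.1.length : Int)) (fun p => -(p.2.1.length : Int))
      = List.foldl mstep none xs := by
  unfold PySem.List.min2?
  congr 1
  funext acc x
  cases acc <;> rfl

lemma max?_eq_foldl (xs : List (List Char)) :
    PySem.List.max? xs (fun c => (c.length : Int)) = List.foldl xstep none xs := by
  unfold PySem.List.max?
  congr 1
  funext acc x
  cases acc <;> rfl

lemma find_eq_of (s c : List Char) (j : Nat) (h1 : c <+: s.drop j)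
    (h2 : ∀ i < j, ¬ c <+: s.drop i) : PySem.Chars.find s c = (j : Int) := by
  have hin : PySem.Chars.isIn c s = true := by
    rw [← PySem.Chars.exists_prefix_drop_iff_isIn]; exact ⟨j, h1⟩
  have hnn : 0 ≤ PySem.Chars.find s c := by
    rw [PySem.Chars.find_nonneg_iff, ← PySem.Chars.isIn_iff_infix]; exact hin
  obtain ⟨hp, hmin⟩ := PySem.Chars.find_spec (s := s) (sub := c) hnn
  rcases Nat.lt_trichotomy (PySem.Chars.find s c).toNat j with h | h | h
  · exact absurd hp (h2 _ h)
  · omega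
  · exact absurd h1 (hmin j h)

lemma pyPartition_prefix {c l : List Char} (h : c <+: l) :
    pyPartition l c = ([], c, l.drop c.length) := by
  have hf : PySem.Chars.find l c = (0 : Int) := find_eq_of l c 0 (by simpa using h) (by omega)
  simp [pyPartition, hf]

lemma pyPartition_pos {c l : List Char} (hin : c <:+: l) (hnp : ¬ c <+: l) :
    1 ≤ (pyPartition l c).1.length := by
  have hnn : 0 ≤ PySem.Chars.find l c := by
    rw [PySem.Chars.find_nonneg_iff]; exact hin
  obtain ⟨hp, hmin⟩ := PySem.Chars.find_spec (s := l) (sub := c) hnn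
  have hne0 : PySem.Chars.find l c ≠ 0 := by
    intro h0; apply hnp; simpa [h0] using hp
  have hl : l ≠ [] := by
    rintro rfl
    exact hnp (List.infix_nil.mp hin ▸ List.nil_prefix)
  have hle := PySem.Chars.find_le_length (s := l) (sub := c)
  have hm1 : ¬ (PySem.Chars.find l c = -1) := by omega
  simp only [pyPartition, hm1, if_false, List.length_take]
  have h2 : 1 ≤ l.length := by
    cases l with | nil => exact absurd rfl hl | cons a t => simp
  omega

lemma pyPartition_cons {c : List Char} {ch : Char} {t : List Char}
    (hin : c <:+: t) (hnp : ¬ c <+: ch :: t) :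
    pyPartition (ch :: t) c = (ch :: (pyPartition t c).1, (pyPartition t c).2.1, (pyPartition t c).2.2) := by
  have hnn : 0 ≤ PySem.Chars.find t c := by
    rw [PySem.Chars.find_nonneg_iff]; exact hin
  obtain ⟨hp, hmin⟩ := PySem.Chars.find_spec (s := t) (sub := c) hnn
  set j : Nat := (PySem.Chars.find t c).toNat with hj
  have hft : PySem.Chars.find t c = (j : Int) := by omega
  have hf : PySem.Chars.find (ch :: t) c = ((j + 1 : Nat) : Int) := by
    refine find_eq_of _ _ (j + 1) (by simpa using hp) ?_
    intro i hi
    cases i with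
    | zero => simpa using hnp
    | succ i => simpa using hmin i (by omega)
  simp only [pyPartition, hf, hft]
  rw [if_neg (by omega : ¬ ((j + 1 : Nat) : Int) = -1), if_neg (by omega : ¬ ((j : Nat) : Int) = -1)]
  simp [List.take_succ_cons, List.drop_succ_cons, Nat.add_right_comm]

lemma findFirst_acc (cands : List (List Char)) (pre l : List Char) :
    findFirst cands pre l = (findFirst cands [] l).map (fun r => (pre ++ r.1, r.2.1, r.2.2)) := by
  induction l generalizing pre with
  | nil => simp [findFirst]
  | cons ch t ih =>
    rw [findFirst]
    conv_rhs => rw [findFirst]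
    cases PySem.List.max? (cands.filter (fun c => PySem.Chars.startswith (ch :: t) c)) (fun c => (c.length : Int)) with
    | some c => simp
    | none =>
      simp only
      rw [ih (pre ++ [ch]), ih ([] ++ [ch])]
      cases findFirst cands [] t with
      | none => rfl
      | some r => simp

lemma foldl_map_rel {α : Type} (f : α → α) (g : Option α → α → Option α)
    (hcomm : ∀ acc x, g (Option.map f acc) (f x) = Option.map f (g acc x)) :
    ∀ (xs : List α) (acc : Option α),
      List.foldl g (Option.map f acc) (xs.map f) = Option.map f (List.foldl g acc xs) := by
  intro xs
  induction xs with
  | nil => intro acc; rfl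
  | cons x t ih =>
    intro acc
    rw [List.map_cons, List.foldl_cons, List.foldl_cons, hcomm]
    exact ih (g acc x)

-- min-by-(len prefix, -len cons) commutes with prepending one char to every prefix
lemma foldl_mstep_map_cons (ch : Char) (xs : List (List Char × List Char × List Char)) :
    List.foldl mstep none (xs.map (fun r => (ch :: r.1, r.2.1, r.2.2)))
      = (List.foldl mstep none xs).map (fun r => (ch :: r.1, r.2.1, r.2.2)) := by
  refine foldl_map_rel _ _ ?_ xs none
  intro acc x
  cases acc with
  | none => rfl
  | some m =>
    simp only [Option.map_some, mstep, List.length_cons]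
    have e1 : ((x.1.length + 1 : Nat) : Int) < ((m.1.length + 1 : Nat) : Int) ↔ ((x.1.length : Nat) : Int) < ((m.1.length : Nat) : Int) := by push_cast; omega
    have e2 : ((m.1.length + 1 : Nat) : Int) < ((x.1.length + 1 : Nat) : Int) ↔ ((m.1.length : Nat) : Int) < ((x.1.length : Nat) : Int) := by push_cast; omega
    simp only [e1, e2]
    split <;> rfl

-- the invariant tying A's fold accumulator to B's
def SyncInv (l : List Char) (accA : Option (List Char × List Char × List Char)) (accB : Option (List Char)) : Prop :=
  (accB = none ∧ (accA = none ∨ ∃ m, accA = some m ∧ 1 ≤ m.1.length))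
  ∨ (∃ c, accB = some c ∧ accA = some ([], c, l.drop c.length))

lemma syncStep (l c : List Char) (accA : Option (List Char × List Char × List Char)) (accB : Option (List Char))
    (h : SyncInv l accA accB) :
    SyncInv l (if PySem.Chars.isIn c l = true then mstep accA (pyPartition l c) else accA)
          (if PySem.Chars.startswith l c = true then xstep accB c else accB) := by
  by_cases hpre : PySem.Chars.startswith l c = true
  · have hpre' : c <+: l := (PySem.Chars.startswith_iff l c).mp hpre
    have hin : PySem.Chars.isIn c l = true := by
      rw [PySem.Chars.isIn_iff_infix]; exact hpre'.isInfix
    rw [if_pos hpre, if_pos hin, pyPartition_prefix hpre']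
    rcases h with ⟨hB, hA⟩ | ⟨c0, hB, hA⟩
    · subst hB
      rcases hA with rfl | ⟨m, rfl, hm⟩
      · exact Or.inr ⟨c, rfl, rfl⟩
      · refine Or.inr ⟨c, rfl, ?_⟩
        simp only [mstep, List.length_nil]
        rw [if_pos (by simp only [Bool.or_eq_true, Bool.and_eq_true, Bool.not_eq_true', decide_eq_true_eq, decide_eq_false_iff_not]; push_cast; exact Or.inl (by omega))]
    · subst hB; subst hA
      simp only [mstep, xstep, List.length_nil]
      by_cases hlen : c0.length < c.length
      · rw [if_pos (by simp only [Bool.or_eq_true, Bool.and_eq_true, Bool.not_eq_true', decide_eq_true_eq, decide_eq_false_iff_not]; push_cast; exact Or.inr ⟨not_false, by omega⟩), if_pos (by exact_mod_cast hlen)]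
        exact Or.inr ⟨c, rfl, rfl⟩
      · rw [if_neg (by simp only [Bool.or_eq_true, Bool.and_eq_true, Bool.not_eq_true', decide_eq_true_eq, decide_eq_false_iff_not]; push_cast; rintro (h | ⟨-, h⟩) <;> first | exact h | omega), if_neg (by exact_mod_cast hlen)]
        exact Or.inr ⟨c0, rfl, rfl⟩
  · rw [if_neg hpre]
    by_cases hinb : PySem.Chars.isIn c l = true
    · have hinf : c <:+: l := (PySem.Chars.isIn_iff_infix c l).mp hinb
      have hnp : ¬ c <+: l := fun hp => hpre ((PySem.Chars.startswith_iff l c).mpr hp)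
      have hpos := pyPartition_pos hinf hnp
      rw [if_pos hinb]
      rcases h with ⟨hB, hA⟩ | ⟨c0, hB, hA⟩
      · subst hB
        rcases hA with rfl | ⟨m, rfl, hm⟩
        · exact Or.inl ⟨rfl, Or.inr ⟨_, rfl, hpos⟩⟩
        · refine Or.inl ⟨rfl, Or.inr ?_⟩
          simp only [mstep]
          split
          · exact ⟨_, rfl, hpos⟩
          · exact ⟨m, rfl, hm⟩
      · subst hB; subst hA
        refine Or.inr ⟨c0, rfl, ?_⟩
        simp only [mstep, List.length_nil]
        rw [if_neg (by simp only [Bool.or_eq_true, Bool.and_eq_true, Bool.not_eq_true', decide_eq_true_eq, decide_eq_false_iff_not]; push_cast; rintro (h | ⟨h, -⟩) <;> omega)]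
    · rw [if_neg hinb]
      exact h

lemma fold_sync (l : List Char) (cands : List (List Char))
    (accA : Option (List Char × List Char × List Char)) (accB : Option (List Char))
    (h : SyncInv l accA accB) :
    SyncInv l (List.foldl (fun acc c => if PySem.Chars.isIn c l = true then mstep acc (pyPartition l c) else acc) accA cands)
          (List.foldl (fun acc c => if PySem.Chars.startswith l c = true then xstep acc c else acc) accB cands) := by
  induction cands generalizing accA accB with
  | nil => exact h
  | cons c t ih =>
    rw [List.foldl_cons, List.foldl_cons]
    exact ih _ _ (syncStep l c accA accB h)

lemma stage_eq (cands : List (List Char)) (hne : ∀ c ∈ cands, c ≠ []) (l : List Char) :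
    PySem.List.min2? ((cands.filter (fun c => PySem.Chars.isIn c l)).map (fun c => pyPartition l c))
        (fun p => (p.1.length : Int)) (fun p => -(p.2.1.length : Int))
      = findFirst cands [] l := by
  induction l with
  | nil =>
    have hfe : cands.filter (fun c => PySem.Chars.isIn c []) = [] := by
      rw [List.filter_eq_nil_iff]
      intro c hc hT
      exact hne c hc (List.infix_nil.mp ((PySem.Chars.isIn_iff_infix c []).mp hT))
    rw [hfe]
    rfl
  | cons ch t ih =>
    conv_rhs => rw [findFirst]
    cases hm : PySem.List.max? (cands.filter (fun c => PySem.Chars.startswith (ch :: t) c)) (fun c => (c.length : Int)) with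
    | some cmax =>
      rw [max?_eq_foldl, List.foldl_filter] at hm
      rw [min2?_eq_foldl, List.foldl_map, List.foldl_filter]
      have hsync := fold_sync (ch :: t) cands none none (Or.inl ⟨rfl, Or.inl rfl⟩)
      rw [hm] at hsync
      rcases hsync with ⟨hB, _⟩ | ⟨c0, hB, hA⟩
      · exact absurd hB (by simp)
      · obtain rfl : c0 = cmax := by injection hB with h; exact h.symm
        exact hA
    | none =>
      rw [PySem.List.max?_eq_none_iff, List.filter_eq_nil_iff] at hm
      have hnp : ∀ c ∈ cands, ¬ c <+: ch :: t :=
        fun c hc hp => hm c hc ((PySem.Chars.startswith_iff (ch :: t) c).mpr hp)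
      have hfe : cands.filter (fun c => PySem.Chars.isIn c (ch :: t)) = cands.filter (fun c => PySem.Chars.isIn c t) := by
        apply List.filter_congr
        intro c hc
        by_cases h1 : PySem.Chars.isIn c t = true
        · rw [h1]
          rw [PySem.Chars.isIn_iff_infix]
          exact List.infix_cons ((PySem.Chars.isIn_iff_infix c t).mp h1)
        · have h2 : ¬ PySem.Chars.isIn c (ch :: t) = true := by
            intro hT
            rcases List.infix_cons_iff.mp ((PySem.Chars.isIn_iff_infix c (ch :: t)).mp hT) with hp | hi
            · exact hnp c hc hp
            · exact h1 ((PySem.Chars.isIn_iff_infix c t).mpr hi)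
          rw [Bool.not_eq_true] at h1 h2
          rw [h1, h2]
      have hmape : (cands.filter (fun c => PySem.Chars.isIn c t)).map (fun c => pyPartition (ch :: t) c)
          = ((cands.filter (fun c => PySem.Chars.isIn c t)).map (fun c => pyPartition t c)).map (fun r => (ch :: r.1, r.2.1, r.2.2)) := by
        rw [List.map_map]
        apply List.map_congr_left
        intro c hc
        rw [List.mem_filter] at hc
        exact pyPartition_cons ((PySem.Chars.isIn_iff_infix c t).mp hc.2) (hnp c hc.1)
      rw [hfe, hmape, min2?_eq_foldl, foldl_mstep_map_cons, ← min2?_eq_foldl, ih]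
      show Option.map (fun r => (ch :: r.1, r.2.1, r.2.2)) (findFirst cands [] t) = findFirst cands ([] ++ [ch]) t
      rw [findFirst_acc cands ([] ++ [ch]) t]
      cases findFirst cands [] t with
      | none => rfl
      | some r => simp

lemma main_of (text : String) (np : Option String) (cp : String)
    (hne : ∀ c ∈ (phonemeSounds.get? cp).getD [], c ≠ "") :
    match_consonant text cp np = match_consonant_alt text cp np := by
  simp only [match_consonant, match_consonant_alt]
  have hne' : ∀ c ∈ ((phonemeSounds.get? cp).getD []).map String.toList, c ≠ [] := by
    intro c hc
    rw [List.mem_map] at hc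
    obtain ⟨s, hs, rfl⟩ := hc
    intro hnil
    exact hne s hs (by rw [← String.ofList_toList (s := s), hnil])
  have key := stage_eq (((phonemeSounds.get? cp).getD []).map String.toList) hne' text.toList
  have hAeq : (((phonemeSounds.get? cp).getD []).filter (fun c => PySem.Str.isIn c text)).map (fun c => pyPartition text.toList c.toList)
      = ((((phonemeSounds.get? cp).getD []).map String.toList).filter (fun c => PySem.Chars.isIn c text.toList)).map (fun c => pyPartition text.toList c) := by
    rw [List.filter_map, List.map_map]
    rfl
  rw [hAeq, key]

-- ===== VERDICT (by name: the statement is the Claim_ definition above) =====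
theorem match_consonant_spec : Claim_equal_match_consonant := by
  intro text cp np _ hPre
  unfold Pre_match_consonant at hPre
  unfold Spec_match_consonant
  fin_cases hPre <;> (refine main_of text np _ ?_; decide)
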